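-- pv_equiv track=rewrite | github.com/Mumulhy/LeetCode | 672-灯泡开关Ⅱ/FlipLights.py | flipLights
-- ===== SOURCE A (Python) =====
-- def flipLights(n: int, presses: int) -> int:
--     seen = set()
--     for i in range(2 ** 4):
--         press_arr = [(i >> j) & 1 for j in range(4)]
--         if sum(press_arr) & 1 == presses & 1 and sum(press_arr) <= presses:
--             status = press_arr[0] ^ press_arr[2] ^ press_arr[3]
--             if n >= 2:
--                 status |= (press_arr[0] ^ press_arr[1]) << 1
--             if n >= 3:
--                 status |= (press_arr[0] ^ press_arr[2]) << 2
--             if n >= 4: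
--                 status |= (press_arr[0] ^ press_arr[1] ^ press_arr[3]) << 3
--             seen.add(status)
--     return len(seen)
-- ===== SOURCE B (Python) =====
-- # Closed-form table: the search space saturates (n clamps at 3 effective cases, presses at 3).
-- _TABLE = ((2, 2, 2), (3, 4, 4), (4, 7, 8))
--
-- def flipLights(n: int, presses: int) -> int:
--     if presses < 0:
--         return 0
--     if presses == 0:
--         return 1
--     row = min(max(n, 1), 3)
--     col = min(presses, 3)
--     return _TABLE[row - 1][col - 1]
-- ===== Notes on version B (the rewrite author's own statement) =====
-- stated objective: simpler
-- what changed: Replaced A's enumeration of all 16 press-button combinations (building a set of reachable states) with a direct closed-form table lookup on the clamped bulb count (1/2/>=3) and clamped press count (<0, 0, 1, 2, >=3).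
import Mathlib
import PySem

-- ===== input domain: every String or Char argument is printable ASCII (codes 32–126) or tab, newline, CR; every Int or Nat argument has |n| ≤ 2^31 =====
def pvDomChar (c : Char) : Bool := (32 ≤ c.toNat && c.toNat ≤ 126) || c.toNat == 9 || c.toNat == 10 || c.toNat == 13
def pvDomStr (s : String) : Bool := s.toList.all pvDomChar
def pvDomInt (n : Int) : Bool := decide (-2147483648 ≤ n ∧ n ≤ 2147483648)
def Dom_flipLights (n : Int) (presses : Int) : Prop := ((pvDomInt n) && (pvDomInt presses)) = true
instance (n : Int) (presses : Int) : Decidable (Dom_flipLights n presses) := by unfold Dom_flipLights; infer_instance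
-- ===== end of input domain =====

-- B replaces A's 16-way enumeration with a closed-form table lookup on clamped (n, presses); equivalence is about the return value only.

-- ===== PORT A =====
-- A enumerates all 2^4 press-button combinations; seen is a Python set of status ints.
-- press_arr = [(i >> j) & 1 for j in range(4)]; j ∈ {0,1,2,3} so j.toNat is exact
def pressArr (i : Int) : List Int :=
  (PySem.List.pyRange 0 4 1).map (fun j => PySem.Int.band (i >>> j.toNat) 1)

-- the body of A's loop over i
def flipBody (n : Int) (presses : Int) (seen : PySem.Set Int) (i : Int) : PySem.Set Int :=
  let press_arr := pressArr i
  let s := press_arr.sum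
  if PySem.Int.mod s 2 = PySem.Int.mod presses 2 ∧ s ≤ presses then
    -- press_arr[0..3]: indices always in range (length 4), so .getD 0 is exact
    let a0 := (PySem.List.pyGet? press_arr 0).getD 0
    let a1 := (PySem.List.pyGet? press_arr 1).getD 0
    let a2 := (PySem.List.pyGet? press_arr 2).getD 0
    let a3 := (PySem.List.pyGet? press_arr 3).getD 0
    let status := PySem.Int.bxor (PySem.Int.bxor a0 a2) a3
    let status := if 2 ≤ n then PySem.Int.bor status ((PySem.Int.bxor a0 a1) <<< 1) else status
    let status := if 3 ≤ n then PySem.Int.bor status ((PySem.Int.bxor a0 a2) <<< 2) else status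
    let status := if 4 ≤ n then PySem.Int.bor status ((PySem.Int.bxor (PySem.Int.bxor a0 a1) a3) <<< 3) else status
    PySem.Set.add seen status
  else seen

def flipLights (n : Int) (presses : Int) : Int :=
  let seen : PySem.Set Int := (PySem.List.pyRange 0 16 1).foldl (flipBody n presses) PySem.Set.empty
  (seen.length : Int)

-- ===== PORT B =====
def pvTable : List (List Int) := [[2, 2, 2], [3, 4, 4], [4, 7, 8]]

def flipLights_alt (n : Int) (presses : Int) : Int :=
  if presses < 0 then 0
  else if presses = 0 then 1
  else
    let row := min (max n 1) 3
    let col := min presses 3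
    -- _TABLE[row-1][col-1]: indices always in range, so .getD is exact
    (PySem.List.pyGet? ((PySem.List.pyGet? pvTable (row - 1)).getD []) (col - 1)).getD 0

-- ===== PRECONDITION & SPEC =====
def Spec_flipLights (n : Int) (presses : Int) (out : Int) : Prop := out = flipLights_alt n presses
instance (n : Int) (presses : Int) (out : Int) : Decidable (Spec_flipLights n presses out) := by unfold Spec_flipLights; infer_instance

-- ===== CLAIM (what is proved, stated in full; the proofs are below) =====
def Claim_equal_flipLights : Prop := ∀ (n : Int) (presses : Int), Dom_flipLights n presses → Spec_flipLights n presses (flipLights n presses)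

-- ===== LEMMAS AND PROOFS =====

-- A's loop body depends on n only through the comparisons 2≤n, 3≤n, 4≤n, and on presses only
-- through its parity and the comparisons s ≤ presses for the possible bit sums s ∈ [0,4].
lemma band_one_bounds (y : Int) : 0 ≤ PySem.Int.band y 1 ∧ PySem.Int.band y 1 ≤ 1 := by
  rw [PySem.Int.band_one]
  have h1 := PySem.Int.mod_nonneg y (b := 2) (by norm_num)
  have h2 := PySem.Int.mod_lt y (b := 2) (by norm_num)
  omega

lemma pressArr_bounds (i : Int) : ∀ x ∈ pressArr i, 0 ≤ x ∧ x ≤ 1 := by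
  intro x hx
  rw [pressArr, List.mem_map] at hx
  obtain ⟨j, -, rfl⟩ := hx
  exact band_one_bounds _

lemma pressArr_sum_bounds (i : Int) : 0 ≤ (pressArr i).sum ∧ (pressArr i).sum ≤ 4 := by
  refine ⟨List.sum_nonneg (fun x hx => (pressArr_bounds i x hx).1), ?_⟩
  have hlen : (pressArr i).length = 4 := by rw [pressArr]; simp [PySem.List.pyRange]
  have h := List.sum_le_card_nsmul (pressArr i) 1 (fun x hx => (pressArr_bounds i x hx).2)
  rw [hlen] at h
  simpa using h

lemma flipBody_bridge (n p n' p' : Int)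
    (h2 : (2 ≤ n) ↔ (2 ≤ n')) (h3 : (3 ≤ n) ↔ (3 ≤ n')) (h4 : (4 ≤ n) ↔ (4 ≤ n'))
    (hm : p % 2 = p' % 2)
    (hle : ∀ s : Int, 0 ≤ s → s ≤ 4 → ((s ≤ p) ↔ (s ≤ p')))
    (seen : PySem.Set Int) (i : Int) :
    flipBody n p seen i = flipBody n' p' seen i := by
  unfold flipBody
  have hmodeq : PySem.Int.mod p 2 = PySem.Int.mod p' 2 := by
    rw [PySem.Int.mod_eq_emod_of_pos (by norm_num), PySem.Int.mod_eq_emod_of_pos (by norm_num), hm]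
  have hcond : (PySem.Int.mod (pressArr i).sum 2 = PySem.Int.mod p 2 ∧ (pressArr i).sum ≤ p) ↔
      (PySem.Int.mod (pressArr i).sum 2 = PySem.Int.mod p' 2 ∧ (pressArr i).sum ≤ p') :=
    and_congr (by rw [hmodeq]) (hle _ (pressArr_sum_bounds i).1 (pressArr_sum_bounds i).2)
  simp only [hcond, h2, h3, h4]

lemma flipA_bridge (n p n' p' : Int)
    (h2 : (2 ≤ n) ↔ (2 ≤ n')) (h3 : (3 ≤ n) ↔ (3 ≤ n')) (h4 : (4 ≤ n) ↔ (4 ≤ n'))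
    (hm : p % 2 = p' % 2)
    (hle : ∀ s : Int, 0 ≤ s → s ≤ 4 → ((s ≤ p) ↔ (s ≤ p'))) :
    flipLights n p = flipLights n' p' := by
  unfold flipLights
  exact congrArg (fun s : List Int => (s.length : Int))
    (PySem.List.foldl_congr_mem _ _ _ _
      (fun seen i _ => flipBody_bridge n p n' p' h2 h3 h4 hm hle seen i))

-- ===== VERDICT (by name: the statement is the Claim_ definition above) =====
theorem flipLights_spec : Claim_equal_flipLights := by
  intro n p _
  unfold Spec_flipLights
  have hn : n ≤ 1 ∨ n = 2 ∨ n = 3 ∨ 4 ≤ n := by omega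
  have hp : (p < 0 ∧ p % 2 = 0) ∨ (p < 0 ∧ p % 2 = 1) ∨ p = 0 ∨ p = 1 ∨ p = 2 ∨ p = 3 ∨ (4 ≤ p ∧ p % 2 = 0) ∨ (4 ≤ p ∧ p % 2 = 1) := by omega
  rcases hn with hn|hn|hn|hn <;> rcases hp with hp|hp|hp|hp|hp|hp|hp|hp
  · rw [flipA_bridge n p 1 (-2) (by omega) (by omega) (by omega) (by omega) (fun s hs1 hs2 => by omega)]
    simp only [flipLights_alt, if_pos (show p < 0 from by omega)]
    decide
  · rw [flipA_bridge n p 1 (-1) (by omega) (by omega) (by omega) (by omega) (fun s hs1 hs2 => by omega)]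
    simp only [flipLights_alt, if_pos (show p < 0 from by omega)]
    decide
  · rw [flipA_bridge n p 1 (0) (by omega) (by omega) (by omega) (by omega) (fun s hs1 hs2 => by omega)]
    simp only [flipLights_alt, if_neg (show ¬ p < 0 from by omega), if_pos (show p = 0 from by omega)]
    decide
  · rw [flipA_bridge n p 1 (1) (by omega) (by omega) (by omega) (by omega) (fun s hs1 hs2 => by omega)]
    simp only [flipLights_alt, if_neg (show ¬ p < 0 from by omega), if_neg (show ¬ p = 0 from by omega),
      show min p 3 = (1 : Int) from by omega, show min (max n 1) 3 = (1 : Int) from by omega]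
    decide
  · rw [flipA_bridge n p 1 (2) (by omega) (by omega) (by omega) (by omega) (fun s hs1 hs2 => by omega)]
    simp only [flipLights_alt, if_neg (show ¬ p < 0 from by omega), if_neg (show ¬ p = 0 from by omega),
      show min p 3 = (2 : Int) from by omega, show min (max n 1) 3 = (1 : Int) from by omega]
    decide
  · rw [flipA_bridge n p 1 (3) (by omega) (by omega) (by omega) (by omega) (fun s hs1 hs2 => by omega)]
    simp only [flipLights_alt, if_neg (show ¬ p < 0 from by omega), if_neg (show ¬ p = 0 from by omega),
      show min p 3 = (3 : Int) from by omega, show min (max n 1) 3 = (1 : Int) from by omega]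
    decide
  · rw [flipA_bridge n p 1 (4) (by omega) (by omega) (by omega) (by omega) (fun s hs1 hs2 => by omega)]
    simp only [flipLights_alt, if_neg (show ¬ p < 0 from by omega), if_neg (show ¬ p = 0 from by omega),
      show min p 3 = (3 : Int) from by omega, show min (max n 1) 3 = (1 : Int) from by omega]
    decide
  · rw [flipA_bridge n p 1 (5) (by omega) (by omega) (by omega) (by omega) (fun s hs1 hs2 => by omega)]
    simp only [flipLights_alt, if_neg (show ¬ p < 0 from by omega), if_neg (show ¬ p = 0 from by omega),
      show min p 3 = (3 : Int) from by omega, show min (max n 1) 3 = (1 : Int) from by omega]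
    decide
  · rw [flipA_bridge n p 2 (-2) (by omega) (by omega) (by omega) (by omega) (fun s hs1 hs2 => by omega)]
    simp only [flipLights_alt, if_pos (show p < 0 from by omega)]
    decide
  · rw [flipA_bridge n p 2 (-1) (by omega) (by omega) (by omega) (by omega) (fun s hs1 hs2 => by omega)]
    simp only [flipLights_alt, if_pos (show p < 0 from by omega)]
    decide
  · rw [flipA_bridge n p 2 (0) (by omega) (by omega) (by omega) (by omega) (fun s hs1 hs2 => by omega)]
    simp only [flipLights_alt, if_neg (show ¬ p < 0 from by omega), if_pos (show p = 0 from by omega)]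
    decide
  · rw [flipA_bridge n p 2 (1) (by omega) (by omega) (by omega) (by omega) (fun s hs1 hs2 => by omega)]
    simp only [flipLights_alt, if_neg (show ¬ p < 0 from by omega), if_neg (show ¬ p = 0 from by omega),
      show min p 3 = (1 : Int) from by omega, show min (max n 1) 3 = (2 : Int) from by omega]
    decide
  · rw [flipA_bridge n p 2 (2) (by omega) (by omega) (by omega) (by omega) (fun s hs1 hs2 => by omega)]
    simp only [flipLights_alt, if_neg (show ¬ p < 0 from by omega), if_neg (show ¬ p = 0 from by omega),
      show min p 3 = (2 : Int) from by omega, show min (max n 1) 3 = (2 : Int) from by omega]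
    decide
  · rw [flipA_bridge n p 2 (3) (by omega) (by omega) (by omega) (by omega) (fun s hs1 hs2 => by omega)]
    simp only [flipLights_alt, if_neg (show ¬ p < 0 from by omega), if_neg (show ¬ p = 0 from by omega),
      show min p 3 = (3 : Int) from by omega, show min (max n 1) 3 = (2 : Int) from by omega]
    decide
  · rw [flipA_bridge n p 2 (4) (by omega) (by omega) (by omega) (by omega) (fun s hs1 hs2 => by omega)]
    simp only [flipLights_alt, if_neg (show ¬ p < 0 from by omega), if_neg (show ¬ p = 0 from by omega),
      show min p 3 = (3 : Int) from by omega, show min (max n 1) 3 = (2 : Int) from by omega]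
    decide
  · rw [flipA_bridge n p 2 (5) (by omega) (by omega) (by omega) (by omega) (fun s hs1 hs2 => by omega)]
    simp only [flipLights_alt, if_neg (show ¬ p < 0 from by omega), if_neg (show ¬ p = 0 from by omega),
      show min p 3 = (3 : Int) from by omega, show min (max n 1) 3 = (2 : Int) from by omega]
    decide
  · rw [flipA_bridge n p 3 (-2) (by omega) (by omega) (by omega) (by omega) (fun s hs1 hs2 => by omega)]
    simp only [flipLights_alt, if_pos (show p < 0 from by omega)]
    decide
  · rw [flipA_bridge n p 3 (-1) (by omega) (by omega) (by omega) (by omega) (fun s hs1 hs2 => by omega)]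
    simp only [flipLights_alt, if_pos (show p < 0 from by omega)]
    decide
  · rw [flipA_bridge n p 3 (0) (by omega) (by omega) (by omega) (by omega) (fun s hs1 hs2 => by omega)]
    simp only [flipLights_alt, if_neg (show ¬ p < 0 from by omega), if_pos (show p = 0 from by omega)]
    decide
  · rw [flipA_bridge n p 3 (1) (by omega) (by omega) (by omega) (by omega) (fun s hs1 hs2 => by omega)]
    simp only [flipLights_alt, if_neg (show ¬ p < 0 from by omega), if_neg (show ¬ p = 0 from by omega),
      show min p 3 = (1 : Int) from by omega, show min (max n 1) 3 = (3 : Int) from by omega]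
    decide
  · rw [flipA_bridge n p 3 (2) (by omega) (by omega) (by omega) (by omega) (fun s hs1 hs2 => by omega)]
    simp only [flipLights_alt, if_neg (show ¬ p < 0 from by omega), if_neg (show ¬ p = 0 from by omega),
      show min p 3 = (2 : Int) from by omega, show min (max n 1) 3 = (3 : Int) from by omega]
    decide
  · rw [flipA_bridge n p 3 (3) (by omega) (by omega) (by omega) (by omega) (fun s hs1 hs2 => by omega)]
    simp only [flipLights_alt, if_neg (show ¬ p < 0 from by omega), if_neg (show ¬ p = 0 from by omega),
      show min p 3 = (3 : Int) from by omega, show min (max n 1) 3 = (3 : Int) from by omega]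
    decide
  · rw [flipA_bridge n p 3 (4) (by omega) (by omega) (by omega) (by omega) (fun s hs1 hs2 => by omega)]
    simp only [flipLights_alt, if_neg (show ¬ p < 0 from by omega), if_neg (show ¬ p = 0 from by omega),
      show min p 3 = (3 : Int) from by omega, show min (max n 1) 3 = (3 : Int) from by omega]
    decide
  · rw [flipA_bridge n p 3 (5) (by omega) (by omega) (by omega) (by omega) (fun s hs1 hs2 => by omega)]
    simp only [flipLights_alt, if_neg (show ¬ p < 0 from by omega), if_neg (show ¬ p = 0 from by omega),
      show min p 3 = (3 : Int) from by omega, show min (max n 1) 3 = (3 : Int) from by omega]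
    decide
  · rw [flipA_bridge n p 4 (-2) (by omega) (by omega) (by omega) (by omega) (fun s hs1 hs2 => by omega)]
    simp only [flipLights_alt, if_pos (show p < 0 from by omega)]
    decide
  · rw [flipA_bridge n p 4 (-1) (by omega) (by omega) (by omega) (by omega) (fun s hs1 hs2 => by omega)]
    simp only [flipLights_alt, if_pos (show p < 0 from by omega)]
    decide
  · rw [flipA_bridge n p 4 (0) (by omega) (by omega) (by omega) (by omega) (fun s hs1 hs2 => by omega)]
    simp only [flipLights_alt, if_neg (show ¬ p < 0 from by omega), if_pos (show p = 0 from by omega)]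
    decide
  · rw [flipA_bridge n p 4 (1) (by omega) (by omega) (by omega) (by omega) (fun s hs1 hs2 => by omega)]
    simp only [flipLights_alt, if_neg (show ¬ p < 0 from by omega), if_neg (show ¬ p = 0 from by omega),
      show min p 3 = (1 : Int) from by omega, show min (max n 1) 3 = (3 : Int) from by omega]
    decide
  · rw [flipA_bridge n p 4 (2) (by omega) (by omega) (by omega) (by omega) (fun s hs1 hs2 => by omega)]
    simp only [flipLights_alt, if_neg (show ¬ p < 0 from by omega), if_neg (show ¬ p = 0 from by omega),
      show min p 3 = (2 : Int) from by omega, show min (max n 1) 3 = (3 : Int) from by omega]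
    decide
  · rw [flipA_bridge n p 4 (3) (by omega) (by omega) (by omega) (by omega) (fun s hs1 hs2 => by omega)]
    simp only [flipLights_alt, if_neg (show ¬ p < 0 from by omega), if_neg (show ¬ p = 0 from by omega),
      show min p 3 = (3 : Int) from by omega, show min (max n 1) 3 = (3 : Int) from by omega]
    decide
  · rw [flipA_bridge n p 4 (4) (by omega) (by omega) (by omega) (by omega) (fun s hs1 hs2 => by omega)]
    simp only [flipLights_alt, if_neg (show ¬ p < 0 from by omega), if_neg (show ¬ p = 0 from by omega),
      show min p 3 = (3 : Int) from by omega, show min (max n 1) 3 = (3 : Int) from by omega]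
    decide
  · rw [flipA_bridge n p 4 (5) (by omega) (by omega) (by omega) (by omega) (fun s hs1 hs2 => by omega)]
    simp only [flipLights_alt, if_neg (show ¬ p < 0 from by omega), if_neg (show ¬ p = 0 from by omega),
      show min p 3 = (3 : Int) from by omega, show min (max n 1) 3 = (3 : Int) from by omega]
    decide
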